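-- pv_equiv track=rewrite | github.com/claudiaqw/head-qa-afi | code/training.py | extract_exams
-- ===== SOURCE A (Python) =====
-- def extract_exams(dataset):
--     exams = {}
--     for instance in dataset:
--         cuaderno = instance['name']
--         if cuaderno in exams:
--             exams[cuaderno].append(instance)
--         else:
--             exams[cuaderno] = [instance]
--     return exams
-- ===== SOURCE B (Python) =====
-- def extract_exams(dataset):
--     names = list(dict.fromkeys(instance['name'] for instance in dataset))
--     return {name: [instance for instance in dataset if instance['name'] == name]
--             for name in names}
-- ===== Notes on version B (the rewrite author's own statement) =====
-- stated objective: alternative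
-- what changed: Replaces the incremental dict-insert/append loop by a two-pass scheme: first dedup the name fields in first-seen order, then build each group with one filter comprehension per name.
import Mathlib
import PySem

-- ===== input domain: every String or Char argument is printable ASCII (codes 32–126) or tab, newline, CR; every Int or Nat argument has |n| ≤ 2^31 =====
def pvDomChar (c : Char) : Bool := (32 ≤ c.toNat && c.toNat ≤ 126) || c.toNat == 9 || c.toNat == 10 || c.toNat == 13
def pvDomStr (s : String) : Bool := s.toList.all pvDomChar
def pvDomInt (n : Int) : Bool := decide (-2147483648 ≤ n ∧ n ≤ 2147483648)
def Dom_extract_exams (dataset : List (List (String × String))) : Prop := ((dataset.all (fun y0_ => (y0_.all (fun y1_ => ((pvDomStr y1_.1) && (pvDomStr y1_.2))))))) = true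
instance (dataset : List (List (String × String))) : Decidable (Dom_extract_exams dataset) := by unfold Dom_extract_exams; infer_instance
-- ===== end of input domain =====

-- B is an alternative two-pass decomposition (dedup the names, then one filter per name),
-- not faster; equivalence is about the return value (A mutates nothing observable).

-- instance['name'] (first-match lookup; "" stands for the KeyError case, which Pre_ excludes)
def pvName (inst : List (String × String)) : String :=
  (PySem.Dict.mk inst).getD "name" ""

-- ===== PORT A =====
def pvStepA (exams : PySem.Dict String (List (List (String × String))))
    (inst : List (String × String)) : PySem.Dict String (List (List (String × String))) :=
  let cuaderno := pvName inst
  if exams.contains cuaderno then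
    exams.modify cuaderno [] (fun l => l ++ [inst])      -- exams[cuaderno].append(instance)
  else
    exams.insert cuaderno [inst]                          -- exams[cuaderno] = [instance]

def extract_exams (dataset : List (List (String × String))) : List (String × List (List (String × String))) :=
  (dataset.foldl pvStepA PySem.Dict.empty).items

-- ===== PORT B =====
def extract_exams_alt (dataset : List (List (String × String))) : List (String × List (List (String × String))) :=
  let names := PySem.List.dedup (dataset.map pvName)      -- list(dict.fromkeys(...))
  names.map (fun name => (name, dataset.filter (fun inst => pvName inst == name)))

-- ===== PRECONDITION & SPEC =====
-- Pre_ excludes instances without a 'name' key, on which Python A (and B) raise KeyError.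
def Pre_extract_exams (dataset : List (List (String × String))) : Prop :=
  (dataset.all (fun inst => inst.any (fun p => p.1 == "name"))) = true
instance (dataset : List (List (String × String))) : Decidable (Pre_extract_exams dataset) := by
  unfold Pre_extract_exams; infer_instance

def pvWitness_extract_exams : (List (List (String × String))) :=
  [[("name", "A1"), ("qid", "1")], [("name", "A2")], [("name", "A1"), ("qid", "2")]]

def Spec_extract_exams (dataset : List (List (String × String))) (out : List (String × List (List (String × String)))) : Prop := out = extract_exams_alt dataset
instance (dataset : List (List (String × String))) (out : List (String × List (List (String × String)))) : Decidable (Spec_extract_exams dataset out) := by unfold Spec_extract_exams; infer_instance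

-- ===== CLAIM (what is proved, stated in full; the proofs are below) =====
def Claim_equal_extract_exams : Prop := ∀ (dataset : List (List (String × String))), Dom_extract_exams dataset → Pre_extract_exams dataset → Spec_extract_exams dataset (extract_exams dataset)

-- ===== LEMMAS AND PROOFS =====

-- dedup of one more element: kept iff new
lemma pv_dedup_append (l : List String) (x : String) :
    PySem.List.dedup (l ++ [x]) =
      if x ∈ l then PySem.List.dedup l else PySem.List.dedup l ++ [x] := by
  have h1 : PySem.List.dedup (l ++ [x]) = PySem.Set.add (PySem.Set.ofList l) x := by
    simp [PySem.List.dedup, PySem.Set.ofList, List.foldl_append]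
  rw [h1, PySem.Set.add]
  by_cases h : x ∈ l <;> simp [PySem.List.dedup, h]

-- first match of (· == n) is n itself once n is present
lemma pv_find?_beq_self (l : List String) (n : String) (h : n ∈ l) :
    l.find? (fun m => m == n) = some n := by
  induction l with
  | nil => cases h
  | cons a t ih =>
    by_cases ha : a = n
    · subst ha; simp [List.find?]
    · have hne : (a == n) = false := by simp [ha]
      have ht : n ∈ t := by
        rcases List.mem_cons.mp h with h' | h'
        · exact absurd h'.symm ha
        · exact h'
      simp [List.find?, hne, ih ht]

-- loop invariant: the dict built by A over any prefix p is B's grouping of p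
lemma pv_fold_items (p : List (List (String × String))) :
    (p.foldl pvStepA PySem.Dict.empty).items =
      (PySem.List.dedup (p.map pvName)).map
        (fun n => (n, p.filter (fun inst => pvName inst == n))) := by
  induction p using List.reverseRecOn with
  | nil => rfl
  | append_singleton p x ih =>
    rw [List.foldl_append, List.foldl_cons, List.foldl_nil, List.map_append, List.map_cons,
      List.map_nil, pv_dedup_append]
    by_cases hc : pvName x ∈ p.map pvName
    · have hmemd : pvName x ∈ PySem.Set.ofList (p.map pvName) :=
        (PySem.Set.mem_ofList _ _).mpr hc
      have hcont : (p.foldl pvStepA PySem.Dict.empty).contains (pvName x) = true := by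
        simp only [PySem.Dict.contains, ih, PySem.List.dedup_eq_ofList, List.any_map,
          Function.comp_def]
        exact List.any_eq_true.mpr ⟨pvName x, hmemd, by simp⟩
      have hget : (p.foldl pvStepA PySem.Dict.empty).getD (pvName x) [] =
          p.filter (fun i => pvName i == pvName x) := by
        simp only [PySem.Dict.getD, PySem.Dict.get?, ih, PySem.List.dedup_eq_ofList,
          List.find?_map, Function.comp_def]
        rw [pv_find?_beq_self _ _ hmemd]
        rfl
      have hrepl : (pvStepA (p.foldl pvStepA PySem.Dict.empty) x).items =
          ((p.foldl pvStepA PySem.Dict.empty).items).map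
            (fun pr => if pr.1 == pvName x then
                (pvName x, p.filter (fun i => pvName i == pvName x) ++ [x]) else pr) := by
        simp [pvStepA, hcont, PySem.Dict.modify, hget, PySem.Dict.insert]
      rw [if_pos hc, hrepl, ih, List.map_map]
      apply List.map_congr_left
      intro m hm
      by_cases hmn : m = pvName x
      · subst hmn; simp [List.filter_append]
      · have h1 : (m == pvName x) = false := by simp [hmn]
        have h2 : (pvName x == m) = false := by simp [Ne.symm hmn]
        simp [h2, List.filter_append, hmn]
    · have hcontf : (p.foldl pvStepA PySem.Dict.empty).contains (pvName x) = false := by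
        simp only [PySem.Dict.contains, ih, PySem.List.dedup_eq_ofList, List.any_map,
          Function.comp_def]
        refine List.any_eq_false.mpr ?_
        intro m hm
        have : m ∈ p.map pvName := (PySem.Set.mem_ofList _ _).mp hm
        simp only [beq_iff_eq]
        intro h
        exact hc (h ▸ this)
      have happ : (pvStepA (p.foldl pvStepA PySem.Dict.empty) x).items =
          (p.foldl pvStepA PySem.Dict.empty).items ++ [(pvName x, [x])] := by
        simp [pvStepA, hcontf, PySem.Dict.insert]
      have hnil : p.filter (fun i => pvName i == pvName x) = [] := by
        refine List.filter_eq_nil_iff.mpr ?_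
        intro i hi
        have : pvName i ∈ p.map pvName := List.mem_map_of_mem hi
        simp only [beq_iff_eq]
        intro h
        exact hc (h ▸ this)
      rw [if_neg hc, happ, ih, List.map_append]
      congr 1
      · apply List.map_congr_left
        intro m hm
        have hmem : m ∈ p.map pvName := (PySem.List.mem_dedup _ _).mp hm
        have h2 : (pvName x == m) = false := by
          simp only [beq_eq_false_iff_ne, ne_eq]
          intro h
          exact hc (h ▸ hmem)
        simp [List.filter_append, h2]
      · simp [List.filter_append, hnil]

-- ===== VERDICT (by name: the statement is the Claim_ definition above) =====
theorem extract_exams_spec : Claim_equal_extract_exams := by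
  intro dataset _ _
  show extract_exams dataset = extract_exams_alt dataset
  simpa [extract_exams, extract_exams_alt] using pv_fold_items dataset
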